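-- pv_equiv track=rewrite | github.com/project-abgal/hatrami | api/server/parser.py | convert_to_hittite_style_transliteration
-- ===== SOURCE A (Python) =====
-- VOEWLS = set(["a", "i", "e", "u"])
--
-- ACCENTED_VOEWLS = {
--     "a": {
--         2: "á",
--         3: "à"
--     },
--     "i": {
--         2: "í",
--         3: "ì"
--     },
--     "e": {
--         2: "é",
--         3: "è"
--     },
--     "u": {
--         2: "ú",
--         3: "ù"
--     },
--     "A": {
--         2: "Á",
--         3: "À"
--     },
--     "I": {
--         2: "Í",
--         3: "Ì"
--     },
--     "E": {
--         2: "É",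
--         3: "È"
--     },
--     "U": {
--         2: "Ú",
--         3: "Ù"
--     },
-- }
--
-- def convert_to_hittite_style_transliteration(reading: str, number: int):
--     ret = ""
--
--     if number != 2 and number != 3:
--         return reading
--
--     replaced = False
--     for i in range(0, len(reading)):
--         if reading[i].lower() in VOEWLS and not replaced:
--             ret += ACCENTED_VOEWLS[reading[i]][number]
--             replaced = True
--         else:
--             ret += reading[i]
--
--     return ret
-- ===== SOURCE B (Python) =====
-- ACCENTED_VOEWLS = {
--     "a": {2: "á", 3: "à"},
--     "i": {2: "í", 3: "ì"},
--     "e": {2: "é", 3: "è"},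
--     "u": {2: "ú", 3: "ù"},
--     "A": {2: "Á", 3: "À"},
--     "I": {2: "Í", 3: "Ì"},
--     "E": {2: "É", 3: "È"},
--     "U": {2: "Ú", 3: "Ù"},
-- }
--
-- def convert_to_hittite_style_transliteration(reading: str, number: int):
--     if number not in (2, 3):
--         return reading
--     i = next((j for j, ch in enumerate(reading) if ch.lower() in "aieu"), None)
--     if i is None:
--         return reading
--     return reading[:i] + ACCENTED_VOEWLS[reading[i]][number] + reading[i + 1:]
-- ===== Notes on version B (the rewrite author's own statement) =====
-- stated objective: simpler
-- what changed: Replaces the whole-string accumulation loop with a replaced-flag by locating the index of the first vowel and splicing the accented character between the untouched prefix and suffix slices.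
import Mathlib
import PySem

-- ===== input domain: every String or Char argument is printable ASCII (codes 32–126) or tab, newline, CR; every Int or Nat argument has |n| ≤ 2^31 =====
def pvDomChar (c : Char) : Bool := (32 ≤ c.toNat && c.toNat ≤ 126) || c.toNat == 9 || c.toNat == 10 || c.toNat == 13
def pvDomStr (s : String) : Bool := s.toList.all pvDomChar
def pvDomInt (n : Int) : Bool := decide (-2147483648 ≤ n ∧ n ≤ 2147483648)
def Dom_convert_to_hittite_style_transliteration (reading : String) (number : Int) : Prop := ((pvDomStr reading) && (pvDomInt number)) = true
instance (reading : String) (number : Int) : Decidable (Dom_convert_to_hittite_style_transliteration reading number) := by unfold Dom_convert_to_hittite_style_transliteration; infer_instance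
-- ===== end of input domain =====

-- ===== PORT A =====
-- B locates the first vowel's index and splices the accented character between the
-- unchanged prefix and suffix, instead of A's character-by-character accumulation with a flag.

-- shared module constants: VOEWLS membership test (via .lower()) and the ACCENTED_VOEWLS nested dict
-- (exact on the ASCII domain: Char.toLower agrees with Python str.lower there)
def pvIsVowel (c : Char) : Bool :=
  c.toLower = 'a' || c.toLower = 'i' || c.toLower = 'e' || c.toLower = 'u'

-- ACCENTED_VOEWLS[c][number] for c a key and number ∈ {2,3}; other chars returned unchanged (unreachable)
def pvAccent (c : Char) (number : Int) : Char :=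
  if number = 2 then
    match c with
    | 'a' => 'á' | 'i' => 'í' | 'e' => 'é' | 'u' => 'ú'
    | 'A' => 'Á' | 'I' => 'Í' | 'E' => 'É' | 'U' => 'Ú'
    | _ => c
  else
    match c with
    | 'a' => 'à' | 'i' => 'ì' | 'e' => 'è' | 'u' => 'ù'
    | 'A' => 'À' | 'I' => 'Ì' | 'E' => 'È' | 'U' => 'Ù'
    | _ => c


-- A's for-loop over range(len(reading)) with accumulator ret and flag replaced
def pvLoopA (number : Int) : List Char → Bool → List Char
  | [], _ => []
  | c :: cs, replaced =>
    if pvIsVowel c && !replaced then pvAccent c number :: pvLoopA number cs true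
    else c :: pvLoopA number cs replaced

def convert_to_hittite_style_transliteration (reading : String) (number : Int) : String :=
  if number ≠ 2 ∧ number ≠ 3 then reading
  else String.ofList (pvLoopA number reading.toList false)


-- ===== PORT B =====

def convert_to_hittite_style_transliteration_alt (reading : String) (number : Int) : String :=
  if number ≠ 2 ∧ number ≠ 3 then reading
  else
    match reading.toList.findIdx? pvIsVowel with
    | none => reading
    | some i =>
      match reading.toList[i]? with
      | none => reading  -- unreachable: findIdx? returns an in-range index
      -- reading[:i] / reading[i+1:] with 0 ≤ i < len: exactly take/drop
      | some c => String.ofList (reading.toList.take i ++ [pvAccent c number] ++ reading.toList.drop (i + 1))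


-- ===== PRECONDITION & SPEC =====
def Spec_convert_to_hittite_style_transliteration (reading : String) (number : Int) (out : String) : Prop := out = convert_to_hittite_style_transliteration_alt reading number
instance (reading : String) (number : Int) (out : String) : Decidable (Spec_convert_to_hittite_style_transliteration reading number out) := by unfold Spec_convert_to_hittite_style_transliteration; infer_instance

-- ===== CLAIM (what is proved, stated in full; the proofs are below) =====
def Claim_equal_convert_to_hittite_style_transliteration : Prop := ∀ (reading : String) (number : Int), Dom_convert_to_hittite_style_transliteration reading number → Spec_convert_to_hittite_style_transliteration reading number (convert_to_hittite_style_transliteration reading number)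

-- ===== LEMMAS AND PROOFS =====
lemma pvLoopA_true (number : Int) (cs : List Char) : pvLoopA number cs true = cs := by
  induction cs with
  | nil => rfl
  | cons c cs ih => simp [pvLoopA, ih]

lemma pvLoopA_splice (number : Int) (cs : List Char) :
    pvLoopA number cs false =
      (match cs.findIdx? pvIsVowel with
       | none => cs
       | some i =>
         match cs[i]? with
         | none => cs
         | some c => cs.take i ++ [pvAccent c number] ++ cs.drop (i + 1)) := by
  induction cs with
  | nil => rfl
  | cons c cs ih =>
    by_cases h : pvIsVowel c = true
    · simp [pvLoopA, h, List.findIdx?_cons, pvLoopA_true]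
    · simp only [pvLoopA, h, Bool.false_and, if_neg Bool.false_ne_true, ih,
        List.findIdx?_cons]
      cases hf : cs.findIdx? pvIsVowel with
      | none => simp
      | some i =>
        simp only [Option.map_some]
        cases hg : cs[i]? with
        | none => simp [hg]
        | some d => simp [hg, List.take_succ_cons, List.drop_succ_cons]


-- ===== VERDICT (by name: the statement is the Claim_ definition above) =====
theorem convert_to_hittite_style_transliteration_spec : Claim_equal_convert_to_hittite_style_transliteration := by
  intro reading number _
  unfold Spec_convert_to_hittite_style_transliteration
  unfold convert_to_hittite_style_transliteration convert_to_hittite_style_transliteration_alt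
  by_cases hn : number ≠ 2 ∧ number ≠ 3
  · simp [hn]
  · simp only [if_neg hn, pvLoopA_splice]
    cases hf : reading.toList.findIdx? pvIsVowel with
    | none => simp [String.ofList_toList]
    | some i =>
      cases hg : reading.toList[i]? with
      | none => simp [hg, String.ofList_toList]
      | some c => simp [hg, String.ofList_append]
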